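-- pv_equiv track=rewrite | github.com/TechGuard/advent_of_code | 2024/solutions/22 Monkey Market.py | part_1
-- ===== SOURCE A (Python) =====
-- def generate_secret(secret):
--     secret ^= secret * 64
--     secret %= 16777216
--     secret ^= secret // 32
--     secret %= 16777216
--     secret ^= secret * 2048
--     secret %= 16777216
--     return secret
--
-- def part_1(input):
--     secrets = list(map(int, input.splitlines()))
--     result = 0
--     for secret in secrets:
--         for _ in range(2000):
--             secret = generate_secret(secret)
--         result += secret
--     return result
-- ===== SOURCE B (Python) =====
-- # B: one PRNG step is GF(2)-linear on the 24-bit secret, so 2000 steps are the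
-- # 2000th power of that linear map; compute it once by binary exponentiation on
-- # bit-column tables, then apply it to each seed with one table application.
--
-- MASK = (1 << 24) - 1
--
--
-- def _step(x):
--     x = (x ^ (x << 6)) & MASK
--     x = (x ^ (x >> 5)) & MASK
--     x = (x ^ (x << 11)) & MASK
--     return x
--
--
-- def _apply(T, x):
--     r = 0
--     for i in range(24):
--         if (x >> i) & 1 == 1:
--             r ^= T[i]
--     return r
--
--
-- def _compose(F, G):
--     return [_apply(F, g) for g in G]
--
--
-- def _power_table(e):
--     P = [1 << i for i in range(24)]
--     B = [_step(1 << i) for i in range(24)]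
--     while e != 0:
--         if e % 2 == 1:
--             P = _compose(B, P)
--         B = _compose(B, B)
--         e //= 2
--     return P
--
--
-- def part_1(input):
--     P = _power_table(2000)
--     total = 0
--     for line in input.splitlines():
--         total += _apply(P, int(line) % 16777216)
--     return total
-- ===== Notes on version B (the rewrite author's own statement) =====
-- stated objective: faster
-- what changed: Each PRNG step is GF(2)-linear on the 24-bit secret, so B precomputes the 2000th power of the step map once by binary exponentiation on 24 bit-column tables and applies it to each seed with a single table application, instead of running the 2000-iteration loop per seed.
import Mathlib
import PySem

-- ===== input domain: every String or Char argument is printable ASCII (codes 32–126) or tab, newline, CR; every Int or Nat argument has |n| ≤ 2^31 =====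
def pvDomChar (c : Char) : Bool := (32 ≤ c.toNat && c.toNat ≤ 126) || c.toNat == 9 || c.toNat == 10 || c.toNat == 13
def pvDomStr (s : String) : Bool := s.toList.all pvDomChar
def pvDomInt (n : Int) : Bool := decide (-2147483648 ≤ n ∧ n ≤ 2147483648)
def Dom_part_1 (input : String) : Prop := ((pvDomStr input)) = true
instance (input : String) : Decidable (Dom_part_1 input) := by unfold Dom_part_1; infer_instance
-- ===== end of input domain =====

-- B replaces A's 2000-step loop per seed by the 2000th power of the GF(2)-linear
-- one-step map, computed once by binary exponentiation on bit-column tables.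

-- ===== PORT A =====
def generate_secret (secret : Int) : Int :=
  let s1 := PySem.Int.mod (PySem.Int.bxor secret (secret * 64)) 16777216
  let s2 := PySem.Int.mod (PySem.Int.bxor s1 (PySem.Int.floordiv s1 32)) 16777216
  let s3 := PySem.Int.mod (PySem.Int.bxor s2 (s2 * 2048)) 16777216
  s3

-- int(line) raises ValueError on a non-integer line: those inputs are outside Pre_;
-- the port substitutes getD 0 exactly there.
def part_1 (input : String) : Int :=
  let secrets := (PySem.Str.splitlines input).map (fun l => (PySem.Int.ofStr? l).getD 0)
  secrets.foldl (fun result secret =>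
    result + (List.range 2000).foldl (fun s _ => generate_secret s) secret) 0

-- ===== PORT B =====
def pvStep (x : Nat) : Nat :=
  let a := (x ^^^ (x <<< 6)) &&& 16777215
  let b := (a ^^^ (a >>> 5)) &&& 16777215
  (b ^^^ (b <<< 11)) &&& 16777215

def pvApply (T : List Nat) (x : Nat) : Nat :=
  (List.range 24).foldl (fun r i => if (x >>> i) &&& 1 = 1 then r ^^^ T.getD i 0 else r) 0

def pvCompose (F G : List Nat) : List Nat := G.map (pvApply F)

def pvPowLoop (e : Nat) (P B : List Nat) : List Nat :=
  if h : e = 0 then P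
  else pvPowLoop (e / 2) (if e % 2 = 1 then pvCompose B P else P) (pvCompose B B)
  decreasing_by exact Nat.div_lt_self (Nat.pos_of_ne_zero h) one_lt_two

def pvPowerTable (e : Nat) : List Nat :=
  pvPowLoop e ((List.range 24).map (fun i => 1 <<< i))
    ((List.range 24).map (fun i => pvStep (1 <<< i)))

def part_1_alt (input : String) : Int :=
  let P := pvPowerTable 2000
  (PySem.Str.splitlines input).foldl (fun total line =>
    total + (pvApply P ((PySem.Int.mod ((PySem.Int.ofStr? line).getD 0) 16777216).toNat) : Int)) 0

-- ===== PRECONDITION & SPEC =====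
-- Pre_ excludes exactly the inputs where A raises: a line int() cannot parse (ValueError).
def Pre_part_1 (input : String) : Prop :=
  ∀ l ∈ PySem.Str.splitlines input, (PySem.Int.ofStr? l) ≠ none
instance (input : String) : Decidable (Pre_part_1 input) := by unfold Pre_part_1; infer_instance

def pvWitness_part_1 : String := "1\n-3"

def Spec_part_1 (input : String) (out : Int) : Prop := out = part_1_alt input
instance (input : String) (out : Int) : Decidable (Spec_part_1 input out) := by unfold Spec_part_1; infer_instance

-- ===== CLAIM (what is proved, stated in full; the proofs are below) =====
def Claim_equal_part_1 : Prop := ∀ (input : String), Dom_part_1 input → Pre_part_1 input → Spec_part_1 input (part_1 input)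

-- ===== LEMMAS AND PROOFS =====

-- g is GF(2)-linear; g keeps 24-bit values 24-bit; T lists g's values on the 24 bit columns
def pvLin (g : Nat → Nat) : Prop := ∀ x y, g (x ^^^ y) = g x ^^^ g y
def pvBound (g : Nat → Nat) : Prop := ∀ x, x < 16777216 → g x < 16777216
def pvRepr (T : List Nat) (g : Nat → Nat) : Prop :=
  T.length = 24 ∧ ∀ i, i < 24 → T.getD i 0 = g (1 <<< i)
def pvPkg (T : List Nat) (g : Nat → Nat) : Prop := pvRepr T g ∧ pvLin g ∧ pvBound g

theorem pvLin_zero {g : Nat → Nat} (hg : pvLin g) : g 0 = 0 := by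
  have h := hg 0 0
  simpa using h

theorem pv_disjoint_add : ∀ x y : Nat, x &&& y = 0 → x ^^^ y = x + y := by
  intro x
  induction x using Nat.strong_induction_on with
  | _ x ih =>
    intro y h
    rcases Nat.eq_zero_or_pos x with hx | hx
    · subst hx; simp
    · have hd : x / 2 &&& y / 2 = 0 := by
        rw [← Nat.and_div_two, h]
      have hih := ih (x / 2) (Nat.div_lt_self hx one_lt_two) (y / 2) hd
      have hpar : ¬(x % 2 = 1 ∧ y % 2 = 1) := by
        intro ⟨h1, h2⟩
        have hb : (x &&& y).testBit 0 = false := by rw [h]; exact Nat.zero_testBit 0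
        rw [Nat.testBit_and] at hb
        simp [Nat.testBit_zero, h1, h2] at hb
      have hdm : 2 * ((x ^^^ y) / 2) + (x ^^^ y) % 2 = x ^^^ y := by omega
      rw [← hdm, Nat.xor_div_two, hih, Nat.xor_mod_two_eq]
      omega

theorem pv_compl {n r : Nat} (h : r < 2 ^ n) : (2 ^ n - 1) - r = r ^^^ (2 ^ n - 1) := by
  have h1 : r &&& (r ^^^ (2 ^ n - 1)) = 0 := by
    apply Nat.eq_of_testBit_eq
    intro i
    rw [Nat.testBit_and, Nat.testBit_xor, Nat.testBit_two_pow_sub_one, Nat.zero_testBit]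
    by_cases hi : i < n
    · cases hr : r.testBit i <;> simp [hi]
    · have hri : r.testBit i = false :=
        Nat.testBit_lt_two_pow (lt_of_lt_of_le h (Nat.pow_le_pow_right (by norm_num) (by omega)))
      simp [hri]
  have h2 : r ^^^ (r ^^^ (2 ^ n - 1)) = 2 ^ n - 1 := Nat.xor_xor_cancel_left _ _
  have h3 := pv_disjoint_add r (r ^^^ (2 ^ n - 1)) h1
  omega

theorem pvLin_stageL (k m : Nat) : pvLin (fun x => (x ^^^ (x <<< k)) &&& m) := by
  intro x y
  show ((x ^^^ y) ^^^ ((x ^^^ y) <<< k)) &&& m = _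
  rw [Nat.shiftLeft_xor_distrib, ← Nat.and_xor_distrib_right]
  congr 1
  simp [Nat.xor_comm, Nat.xor_left_comm]

theorem pvLin_stageR (k m : Nat) : pvLin (fun x => (x ^^^ (x >>> k)) &&& m) := by
  intro x y
  show ((x ^^^ y) ^^^ ((x ^^^ y) >>> k)) &&& m = _
  rw [Nat.shiftRight_xor_distrib, ← Nat.and_xor_distrib_right]
  congr 1
  simp [Nat.xor_comm, Nat.xor_left_comm]

theorem pvStep_lin : pvLin pvStep := by
  intro x y
  have h1 := pvLin_stageL 6 16777215 x y
  have h2 := pvLin_stageR 5 16777215 ((x ^^^ x <<< 6) &&& 16777215) ((y ^^^ y <<< 6) &&& 16777215)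
  have h3 := pvLin_stageL 11 16777215
    ((((x ^^^ x <<< 6) &&& 16777215) ^^^ ((x ^^^ x <<< 6) &&& 16777215) >>> 5) &&& 16777215)
    ((((y ^^^ y <<< 6) &&& 16777215) ^^^ ((y ^^^ y <<< 6) &&& 16777215) >>> 5) &&& 16777215)
  simp only [pvStep]
  simp only at h1 h2 h3
  rw [h1, h2, h3]

theorem pvStep_bound : pvBound pvStep := by
  intro x _
  show (_ &&& 16777215) < 16777216
  exact Nat.lt_succ_of_le Nat.and_le_right

theorem pvApply_aux {g : Nat → Nat} (hg : pvLin g) (T : List Nat) :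
    ∀ n, n ≤ 24 → (∀ i, i < n → T.getD i 0 = g (1 <<< i)) →
    ∀ x, x < 2 ^ n →
    (List.range n).foldl (fun r i => if (x >>> i) &&& 1 = 1 then r ^^^ T.getD i 0 else r) 0 = g x := by
  intro n
  induction n with
  | zero =>
    intro _ _ x hx
    have : x = 0 := by omega
    subst this
    simp [pvLin_zero hg]
  | succ n ih =>
    intro hn hT x hx
    have hn' : n ≤ 24 := by omega
    have hTn : ∀ i, i < n → T.getD i 0 = g (1 <<< i) := fun i hi => hT i (by omega)
    have hpow : 0 < 2 ^ n := Nat.two_pow_pos n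
    have hx' : x % 2 ^ n < 2 ^ n := Nat.mod_lt _ hpow
    have hx2 : x < 2 * 2 ^ n := by
      have := pow_succ 2 n
      omega
    rw [List.range_succ, List.foldl_append]
    have hcong :
        (List.range n).foldl (fun r i => if (x >>> i) &&& 1 = 1 then r ^^^ T.getD i 0 else r) 0 =
        (List.range n).foldl (fun r i => if ((x % 2 ^ n) >>> i) &&& 1 = 1 then r ^^^ T.getD i 0 else r) 0 := by
      apply PySem.List.foldl_congr_mem
      intro acc i hi
      have hi' : i < n := List.mem_range.mp hi
      have hb : (x >>> i) &&& 1 = ((x % 2 ^ n) >>> i) &&& 1 := by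
        simp only [Nat.shiftRight_eq_div_pow, Nat.and_one_is_mod]
        rw [show (2:Nat) ^ n = 2 ^ i * 2 ^ (n - i) by rw [← pow_add]; congr 1; omega]
        rw [Nat.mod_mul_right_div_self]
        exact (Nat.mod_mod_of_dvd _ (dvd_pow_self 2 (by omega))).symm
      rw [hb]
    rw [hcong, ih hn' hTn (x % 2 ^ n) hx']
    simp only [List.foldl_cons, List.foldl_nil]
    have hdm := Nat.div_add_mod x (2 ^ n)
    have hb1 : (x >>> n) &&& 1 = x / 2 ^ n % 2 := by
      simp [Nat.shiftRight_eq_div_pow, Nat.and_one_is_mod]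
    have hqlt : x / 2 ^ n < 2 := by
      rw [Nat.div_lt_iff_lt_mul hpow]
      omega
    obtain ⟨q, hq⟩ : ∃ q, x / 2 ^ n = q := ⟨_, rfl⟩
    rw [hq] at hdm hqlt hb1
    by_cases hbit : (x >>> n) &&& 1 = 1
    · rw [if_pos hbit]
      have hbit' := hbit
      rw [hb1] at hbit'
      have hdiv : q = 1 := by omega
      rw [hdiv] at hdm
      have hxeq : x = 2 ^ n + x % 2 ^ n := by omega
      have hdisj : x % 2 ^ n &&& 2 ^ n = 0 := by
        apply Nat.eq_of_testBit_eq
        intro i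
        rw [Nat.testBit_and, Nat.testBit_two_pow, Nat.zero_testBit]
        by_cases hni : n = i
        · subst hni
          simp [Nat.testBit_lt_two_pow hx']
        · simp [hni]
      have hxor : x % 2 ^ n ^^^ 2 ^ n = x := by
        rw [pv_disjoint_add _ _ hdisj]
        omega
      rw [hT n (by omega), Nat.one_shiftLeft, ← hg, hxor]
    · rw [if_neg hbit]
      have hbit' : (x >>> n) &&& 1 ≠ 1 := hbit
      rw [hb1] at hbit'
      have hq0 : q = 0 := by omega
      rw [hq0] at hdm
      have : x % 2 ^ n = x := by omega
      rw [this]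

theorem pvApply_eq {T : List Nat} {g : Nat → Nat} (hg : pvLin g) (hT : pvRepr T g)
    {x : Nat} (hx : x < 16777216) : pvApply T x = g x := by
  exact pvApply_aux hg T 24 le_rfl hT.2 x (by norm_num at hx ⊢; exact hx)

theorem pv_getD_map_range (f : Nat → Nat) (i : Nat) (hi : i < 24) :
    ((List.range 24).map f).getD i 0 = f i := by
  simp [List.getD_eq_getElem?_getD, List.getElem?_map, List.getElem?_range hi]

theorem pvPkg_compose {F G : List Nat} {f g : Nat → Nat}
    (hF : pvPkg F f) (hG : pvPkg G g) : pvPkg (pvCompose F G) (fun x => f (g x)) := by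
  obtain ⟨⟨hFl, hFg⟩, hFlin, hFb⟩ := hF
  obtain ⟨⟨hGl, hGg⟩, hGlin, hGb⟩ := hG
  refine ⟨⟨by simp [pvCompose, hGl], ?_⟩, ?_, ?_⟩
  · intro i hi
    have hi' : i < G.length := by omega
    have hget : (pvCompose F G).getD i 0 = pvApply F (G.getD i 0) := by
      simp [pvCompose, List.getD_eq_getElem?_getD, List.getElem?_map,
        List.getElem?_eq_getElem hi']
    rw [hget, hGg i hi]
    have harg : g (1 <<< i) < 16777216 := by
      apply hGb
      rw [Nat.one_shiftLeft]
      have : (2:Nat) ^ i < 2 ^ 24 := Nat.pow_lt_pow_right one_lt_two hi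
      norm_num at this ⊢
      omega
    exact pvApply_eq hFlin ⟨hFl, hFg⟩ harg
  · intro x y
    show f (g (x ^^^ y)) = _
    rw [hGlin, hFlin]
  · intro x hx
    exact hFb _ (hGb _ hx)

theorem pvPkg_ext {T : List Nat} {g h : Nat → Nat} (hT : pvPkg T g) (he : ∀ x, g x = h x) :
    pvPkg T h := by
  have : g = h := funext he
  rwa [this] at hT

theorem pv_iterate_double (b : Nat → Nat) : ∀ (k : Nat) (z : Nat),
    (fun z => b (b z))^[k] z = b^[2 * k] z := by
  intro k
  induction k with
  | zero => intro z; rfl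
  | succ k ih =>
    intro z
    rw [Function.iterate_succ_apply, ih]
    have : 2 * (k + 1) = (2 * k + 1) + 1 := by omega
    rw [this, Function.iterate_succ_apply, Function.iterate_succ_apply]

theorem pvPowLoop_pkg : ∀ (e : Nat) (P B : List Nat) (p b : Nat → Nat), pvPkg P p → pvPkg B b →
    pvPkg (pvPowLoop e P B) (fun x => b^[e] (p x)) := by
  intro e
  induction e using Nat.strong_induction_on with
  | _ e ih =>
    intro P B p b hP hB
    rw [pvPowLoop]
    by_cases he : e = 0
    · rw [dif_pos he]
      subst he
      exact pvPkg_ext hP fun x => rfl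
    · rw [dif_neg he]
      have hBB : pvPkg (pvCompose B B) (fun x => b (b x)) := pvPkg_compose hB hB
      have hP' : pvPkg (if e % 2 = 1 then pvCompose B P else P)
          (if e % 2 = 1 then (fun x => b (p x)) else p) := by
        by_cases ho : e % 2 = 1
        · rw [if_pos ho, if_pos ho]; exact pvPkg_compose hB hP
        · rw [if_neg ho, if_neg ho]; exact hP
      have hrec := ih (e / 2) (Nat.div_lt_self (Nat.pos_of_ne_zero he) one_lt_two)
        _ _ _ _ hP' hBB
      apply pvPkg_ext hrec
      intro x
      by_cases ho : e % 2 = 1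
      · rw [if_pos ho]
        rw [pv_iterate_double]
        have he2 : e = 2 * (e / 2) + 1 := by omega
        conv_rhs => rw [he2]
        rw [Function.iterate_succ_apply]
      · rw [if_neg ho]
        rw [pv_iterate_double]
        have he2 : e = 2 * (e / 2) := by omega
        conv_rhs => rw [he2]

theorem pvPowerTable_pkg : pvPkg (pvPowerTable 2000) pvStep^[2000] := by
  have hid : pvPkg ((List.range 24).map (fun i => 1 <<< i)) (fun x => x) := by
    refine ⟨⟨by simp, fun i hi => pv_getD_map_range _ i hi⟩, fun x y => rfl, fun x hx => hx⟩
  have hstep : pvPkg ((List.range 24).map (fun i => pvStep (1 <<< i))) pvStep := by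
    refine ⟨⟨by simp, fun i hi => pv_getD_map_range _ i hi⟩, pvStep_lin, pvStep_bound⟩
  have h := pvPowLoop_pkg 2000 _ _ _ _ hid hstep
  exact pvPkg_ext h fun x => rfl

-- bits of 64*n+63: it is (n <<< 6) xor 63
theorem pv_64n63 (n : Nat) : 64 * n + 63 = (n <<< 6) ^^^ 63 := by
  have hd : (n <<< 6) &&& 63 = 0 := by
    apply Nat.eq_of_testBit_eq
    intro i
    rw [Nat.testBit_and, Nat.testBit_shiftLeft, Nat.zero_testBit,
      show (63:Nat) = 2 ^ 6 - 1 by norm_num, Nat.testBit_two_pow_sub_one]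
    by_cases h6 : 6 ≤ i
    · simp [h6, show ¬ i < 6 by omega]
    · simp [h6]
  rw [pv_disjoint_add _ _ hd, Nat.shiftLeft_eq]
  have h64 : (2:Nat) ^ 6 = 64 := by norm_num
  rw [h64]
  omega

-- first PRNG step: A's Int computation equals B's Nat computation on s mod 2^24
theorem pv_step1_bridge (s : Int) :
    PySem.Int.mod (PySem.Int.bxor s (s * 64)) 16777216 =
      ((((PySem.Int.mod s 16777216).toNat ^^^ ((PySem.Int.mod s 16777216).toNat <<< 6)) &&& 16777215 : Nat) : Int) := by
  have hc : (16777216 : Int) = ((16777216 : Nat) : Int) := by norm_num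
  by_cases hs : 0 ≤ s
  · lift s to Nat using hs with n
    have h64 : ((n : Int) * 64) = ((n * 64 : Nat) : Int) := by push_cast; ring
    rw [h64, PySem.Int.bxor_natCast, hc, PySem.Int.mod_natCast, PySem.Int.mod_natCast]
    rw [Int.toNat_natCast]
    norm_cast
    rw [show n * 64 = n <<< 6 by norm_num [Nat.shiftLeft_eq],
      show (16777215:Nat) = 2 ^ 24 - 1 by norm_num,
      show (16777216:Nat) = 2 ^ 24 by norm_num,
      Nat.and_two_pow_sub_one_eq_mod]
    apply Nat.eq_of_testBit_eq
    intro i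
    simp only [Nat.testBit_mod_two_pow, Nat.testBit_xor, Nat.testBit_shiftLeft]
    by_cases hi : i < 24
    · by_cases h6 : 6 ≤ i
      · simp [hi, h6, show i - 6 < 24 by omega]
      · simp [hi, h6]
    · simp [hi]
  · have hs : s < 0 := Int.lt_of_not_ge hs
    set n : Nat := (-s - 1).toNat with hn
    have hsn : s = -((n : Int) + 1) := by omega
    have hb1 : ¬ 0 ≤ s := by omega
    have hb2 : ¬ 0 ≤ s * 64 := by omega
    have hbx : PySem.Int.bxor s (s * 64) = (((-s - 1).toNat ^^^ (-(s * 64) - 1).toNat : Nat) : Int) := by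
      simp only [PySem.Int.bxor]
      rw [if_neg hb1, if_neg hb2]
    have hA : (-s - 1).toNat = n := rfl
    have hB : (-(s * 64) - 1).toNat = 64 * n + 63 := by omega
    have hmodfe : PySem.Int.mod s 16777216 = s % 16777216 := by
      show s.fmod 16777216 = s % 16777216
      rw [Int.fmod_eq_emod]
      simp
    have ht : (PySem.Int.mod s 16777216).toNat = 2 ^ 24 - 1 - n % 2 ^ 24 := by
      rw [hmodfe]
      omega
    rw [hbx, hA, hB, ht, hc, PySem.Int.mod_natCast]
    norm_cast
    rw [pv_compl (Nat.mod_lt n (by norm_num)), pv_64n63,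
      show (16777215:Nat) = 2 ^ 24 - 1 by norm_num,
      show (16777216:Nat) = 2 ^ 24 by norm_num,
      Nat.and_two_pow_sub_one_eq_mod]
    apply Nat.eq_of_testBit_eq
    intro i
    simp only [Nat.testBit_mod_two_pow, Nat.testBit_xor, Nat.testBit_shiftLeft,
      Nat.testBit_two_pow_sub_one, show (63:Nat) = 2 ^ 6 - 1 by norm_num]
    by_cases hi : i < 24
    · by_cases h6 : 6 ≤ i
      · simp [hi, h6, show i - 6 < 24 by omega, show ¬ i < 6 by omega]
      · simp [hi, h6, show i < 6 by omega]
    · simp [hi]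

theorem pv_gen_bridge (s : Int) :
    generate_secret s = ((pvStep (PySem.Int.mod s 16777216).toNat : Nat) : Int) := by
  have hc : (16777216 : Int) = ((16777216 : Nat) : Int) := by norm_num
  have hc32 : (32 : Int) = ((32 : Nat) : Int) := by norm_num
  set t : Nat := (PySem.Int.mod s 16777216).toNat with htdef
  show PySem.Int.mod (PySem.Int.bxor (PySem.Int.mod (PySem.Int.bxor
      (PySem.Int.mod (PySem.Int.bxor s (s * 64)) 16777216)
      (PySem.Int.floordiv (PySem.Int.mod (PySem.Int.bxor s (s * 64)) 16777216) 32)) 16777216)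
      ((PySem.Int.mod (PySem.Int.bxor (PySem.Int.mod (PySem.Int.bxor s (s * 64)) 16777216)
      (PySem.Int.floordiv (PySem.Int.mod (PySem.Int.bxor s (s * 64)) 16777216) 32)) 16777216) * 2048)) 16777216
      = ((pvStep t : Nat) : Int)
  rw [pv_step1_bridge s]
  set a : Nat := (t ^^^ t <<< 6) &&& 16777215 with hadef
  have hstage2 : PySem.Int.mod (PySem.Int.bxor ((a : Nat) : Int)
      (PySem.Int.floordiv ((a : Nat) : Int) 32)) 16777216 = (((a ^^^ a >>> 5) &&& 16777215 : Nat) : Int) := by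
    rw [hc32, PySem.Int.floordiv_natCast, PySem.Int.bxor_natCast, hc, PySem.Int.mod_natCast]
    norm_cast
    rw [show a / 32 = a >>> 5 by norm_num [Nat.shiftRight_eq_div_pow],
      show (16777215:Nat) = 2 ^ 24 - 1 by norm_num,
      show (16777216:Nat) = 2 ^ 24 by norm_num,
      Nat.and_two_pow_sub_one_eq_mod]
  rw [hstage2]
  set b : Nat := (a ^^^ a >>> 5) &&& 16777215 with hbdef
  have h2048 : ((b : Nat) : Int) * 2048 = ((b * 2048 : Nat) : Int) := by push_cast; ring
  rw [h2048, PySem.Int.bxor_natCast, hc, PySem.Int.mod_natCast]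
  norm_cast
  have hps : pvStep t = (b ^^^ b <<< 11) &&& 16777215 := rfl
  rw [hps, show b * 2048 = b <<< 11 by norm_num [Nat.shiftLeft_eq],
    show (16777215:Nat) = 2 ^ 24 - 1 by norm_num,
    show (16777216:Nat) = 2 ^ 24 by norm_num,
    Nat.and_two_pow_sub_one_eq_mod]

theorem pv_mod_self {m : Nat} (hm : m < 16777216) :
    (PySem.Int.mod (m : Int) 16777216).toNat = m := by
  have hc : (16777216 : Int) = ((16777216 : Nat) : Int) := by norm_num
  rw [hc, PySem.Int.mod_natCast, Int.toNat_natCast]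
  exact Nat.mod_eq_of_lt hm

theorem pv_iter_bound : ∀ (k m : Nat), m < 16777216 → pvStep^[k] m < 16777216 := by
  intro k
  induction k with
  | zero => intro m hm; simpa using hm
  | succ k ih =>
    intro m hm
    rw [Function.iterate_succ_apply']
    exact pvStep_bound _ (ih m hm)

theorem pv_iter_bridge : ∀ (k m : Nat), m < 16777216 →
    (List.range k).foldl (fun s _ => generate_secret s) ((m : Nat) : Int) = ((pvStep^[k] m : Nat) : Int) := by
  intro k
  induction k with
  | zero => intro m hm; simp
  | succ k ih =>
    intro m hm
    rw [List.range_succ, List.foldl_append, ih m hm]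
    simp only [List.foldl_cons, List.foldl_nil]
    rw [pv_gen_bridge, pv_mod_self (pv_iter_bound k m hm)]
    exact congrArg _ (Function.iterate_succ_apply' pvStep k m).symm

theorem pv_mod_toNat_lt (s : Int) : (PySem.Int.mod s 16777216).toNat < 16777216 := by
  have h1 := PySem.Int.mod_nonneg s (b := 16777216) (by norm_num)
  have h2 := PySem.Int.mod_lt s (b := 16777216) (by norm_num)
  omega

theorem pv_inner_bridge (s : Int) :
    (List.range 2000).foldl (fun s _ => generate_secret s) s =
      ((pvStep^[2000] (PySem.Int.mod s 16777216).toNat : Nat) : Int) := by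
  rw [show (2000:Nat) = 1999 + 1 from rfl, List.range_succ_eq_map]
  rw [List.foldl_cons, List.foldl_map]
  rw [pv_gen_bridge s]
  rw [pv_iter_bridge 1999 _ (pvStep_bound _ (pv_mod_toNat_lt s))]
  exact congrArg _ (Function.iterate_succ_apply pvStep 1999 ((PySem.Int.mod s 16777216).toNat)).symm

-- ===== VERDICT (by name: the statement is the Claim_ definition above) =====
set_option maxRecDepth 8192 in
theorem part_1_spec : Claim_equal_part_1 := by
  intro input _ _
  unfold Spec_part_1 part_1 part_1_alt
  rw [List.foldl_map]
  apply PySem.List.foldl_congr_mem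
  intro acc l _
  rw [pv_inner_bridge]
  congr 1
  have hpkg := pvPowerTable_pkg
  rw [pvApply_eq hpkg.2.1 hpkg.1 (pv_mod_toNat_lt _)]
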